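-- pv_equiv track=rewrite | github.com/ashleigh-hopkins/MAC-577IF2-E-research | research_archive/analyze_hex_changes.py | analyze_code_changes
-- ===== SOURCE A (Python) =====
-- from typing import List, Dict, Any
--
-- def hex_to_bytes(hex_string: str) -> List[str]:
--     """Convert hex string to list of byte pairs."""
--     # Remove 'fc' prefix and split into byte pairs
--     clean_hex = hex_string[2:] if hex_string.startswith('fc') else hex_string
--     return [clean_hex[i:i+2] for i in range(0, len(clean_hex), 2)]
--
-- def analyze_code_changes(data: List[Dict[str, Any]]) -> Dict[str, Dict[int, List[str]]]:
--     """Analyze which bytes change in each code group across iterations."""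
--     code_changes = {}
--
--     # Process each code index (0-5 for codes)
--     for code_idx in range(6):  # Assuming 6 code entries
--         code_changes[f"CODE[{code_idx}]"] = {}
--
--         # Get all hex strings for this code index across iterations
--         code_strings = []
--         for iteration in data:
--             if code_idx < len(iteration['codes']):
--                 code_strings.append(iteration['codes'][code_idx])
--
--         if not code_strings:
--             continue
--
--         # Convert to byte arrays
--         byte_arrays = [hex_to_bytes(code) for code in code_strings]
--
--         # Find bytes that change
--         if byte_arrays:
--             max_length = max(len(arr) for arr in byte_arrays)
--
--             for byte_pos in range(max_length):
--                 values_at_pos = []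
--                 for arr in byte_arrays:
--                     if byte_pos < len(arr):
--                         values_at_pos.append(arr[byte_pos])
--                     else:
--                         values_at_pos.append('--')
--
--                 # Check if this byte position has variations
--                 unique_values = set(values_at_pos)
--                 if len(unique_values) > 1:
--                     code_changes[f"CODE[{code_idx}]"][byte_pos] = values_at_pos
--
--     return code_changes
-- ===== SOURCE B (Python) =====
-- from typing import List, Dict, Any
--
-- def hex_to_bytes(hex_string: str) -> List[str]:
--     """Convert hex string to list of byte pairs."""
--     clean_hex = hex_string[2:] if hex_string.startswith('fc') else hex_string
--     return [clean_hex[i:i+2] for i in range(0, len(clean_hex), 2)]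
--
-- def analyze_code_changes(data: List[Dict[str, Any]]) -> Dict[str, Dict[int, List[str]]]:
--     """Analyze which bytes change in each code group across iterations.
--
--     Row-wise strategy: diff every byte array against the FIRST one to collect
--     the set of changed positions, then materialize only those columns."""
--     code_changes = {}
--     for code_idx in range(6):
--         code_changes[f"CODE[{code_idx}]"] = {}
--         byte_arrays = [hex_to_bytes(it['codes'][code_idx]) for it in data
--                        if code_idx < len(it['codes'])]
--         if not byte_arrays:
--             continue
--         ref = byte_arrays[0]
--         changed = set()
--         for arr in byte_arrays[1:]:
--             for pos in range(max(len(ref), len(arr))):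
--                 a = ref[pos] if pos < len(ref) else '--'
--                 b = arr[pos] if pos < len(arr) else '--'
--                 if a != b:
--                     changed.add(pos)
--         code_changes[f"CODE[{code_idx}]"] = {
--             pos: [arr[pos] if pos < len(arr) else '--' for arr in byte_arrays]
--             for pos in sorted(changed)
--         }
--     return code_changes
-- ===== Notes on version B (the rewrite author's own statement) =====
-- stated objective: alternative
-- what changed: Replaces A's column-wise pass (index every array at every position, pad with '--', test set-cardinality per column) with a row-wise diff: each byte array is compared once against the first array to accumulate a set of changed positions, and only those columns are then materialized via a dict comprehension over the sorted position set.
import Mathlib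
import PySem

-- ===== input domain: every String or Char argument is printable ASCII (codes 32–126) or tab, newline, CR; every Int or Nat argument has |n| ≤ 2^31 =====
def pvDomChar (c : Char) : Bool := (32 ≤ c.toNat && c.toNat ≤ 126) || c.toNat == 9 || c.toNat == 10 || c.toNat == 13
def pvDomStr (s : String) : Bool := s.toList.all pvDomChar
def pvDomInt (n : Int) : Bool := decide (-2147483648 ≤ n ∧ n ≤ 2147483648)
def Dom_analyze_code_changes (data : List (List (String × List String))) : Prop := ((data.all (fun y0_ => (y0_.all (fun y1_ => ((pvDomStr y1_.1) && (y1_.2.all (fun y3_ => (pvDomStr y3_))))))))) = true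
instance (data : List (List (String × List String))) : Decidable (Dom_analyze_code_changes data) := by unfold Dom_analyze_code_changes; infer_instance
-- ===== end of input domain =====

-- B finds the changed positions by diffing each byte array against the first one (a row-wise
-- scan into a position set), then materializes only those columns, replacing A's column-wise
-- pad-and-test-uniqueness pass (objective: alternative; same cost; equivalence of return values).


-- ===== PORT A =====
-- shared module helper (same module as analyze_code_changes in the Python source)
def hex_to_bytes (hex_string : String) : List String :=
  let clean_hex : String :=
    if PySem.Str.startswith hex_string "fc" then PySem.Str.slice hex_string (some 2) none
    else hex_string
  (PySem.List.pyRange 0 (PySem.Str.len clean_hex) 2).map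
    (fun i => PySem.Str.slice clean_hex (some i) (some (i + 2)))

def analyze_code_changes (data : List (List (String × List String))) :
    List (String × List (Int × List String)) :=
  let code_changes : PySem.Dict String (PySem.Dict Int (List String)) :=
    (PySem.List.pyRange 0 6 1).foldl (fun code_changes code_idx =>
      let key := "CODE[" ++ PySem.Int.toStr code_idx ++ "]"
      let code_changes := code_changes.insert key PySem.Dict.empty
      let code_strings : List String := data.foldl (fun code_strings iteration =>
        let codes := ((PySem.Dict.mk iteration).get? "codes").getD []
        if code_idx < (codes.length : Int) then
          code_strings ++ [PySem.List.pyGetD codes code_idx ""]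
        else code_strings) []
      if code_strings = [] then code_changes
      else
        let byte_arrays := code_strings.map hex_to_bytes
        if byte_arrays = [] then code_changes
        else
          let max_length : Int :=
            (PySem.List.max? (byte_arrays.map (fun arr => (arr.length : Int))) (fun x => x)).getD 0
          let inner : PySem.Dict Int (List String) :=
            (PySem.List.pyRange 0 max_length 1).foldl (fun d byte_pos =>
              let values_at_pos : List String := byte_arrays.foldl (fun vs arr =>
                vs ++ [if byte_pos < (arr.length : Int) then PySem.List.pyGetD arr byte_pos ""
                       else "--"]) []
              let unique_values := PySem.Set.ofList values_at_pos
              if 1 < unique_values.length then d.insert byte_pos values_at_pos else d)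
              PySem.Dict.empty
          code_changes.insert key inner)
      PySem.Dict.empty
  code_changes.items.map (fun kv => (kv.1, kv.2.items))

-- ===== PORT B =====
def analyze_code_changes_alt (data : List (List (String × List String))) :
    List (String × List (Int × List String)) :=
  let code_changes : PySem.Dict String (PySem.Dict Int (List String)) :=
    (PySem.List.pyRange 0 6 1).foldl (fun code_changes code_idx =>
      let key := "CODE[" ++ PySem.Int.toStr code_idx ++ "]"
      let code_changes := code_changes.insert key PySem.Dict.empty
      let byte_arrays : List (List String) := data.filterMap (fun it =>
        let codes := ((PySem.Dict.mk it).get? "codes").getD []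
        if code_idx < (codes.length : Int) then
          some (hex_to_bytes (PySem.List.pyGetD codes code_idx ""))
        else none)
      match byte_arrays with
      | [] => code_changes
      | ref :: rest =>
        let changed : PySem.Set Int := rest.foldl (fun changed arr =>
          (PySem.List.pyRange 0 (max (ref.length : Int) (arr.length : Int)) 1).foldl
            (fun changed pos =>
              let a := if pos < (ref.length : Int) then PySem.List.pyGetD ref pos "" else "--"
              let b := if pos < (arr.length : Int) then PySem.List.pyGetD arr pos "" else "--"
              if a ≠ b then PySem.Set.add changed pos else changed) changed) PySem.Set.empty
        let inner : PySem.Dict Int (List String) :=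
          (PySem.List.sorted changed (fun x => x) false).foldl (fun d pos =>
            d.insert pos ((ref :: rest).map (fun arr =>
              if pos < (arr.length : Int) then PySem.List.pyGetD arr pos "" else "--")))
            PySem.Dict.empty
        code_changes.insert key inner)
      PySem.Dict.empty
  code_changes.items.map (fun kv => (kv.1, kv.2.items))

-- ===== PRECONDITION & SPEC =====
-- Pre_ excludes exactly the iterations without a 'codes' key, on which Python A raises KeyError.
def Pre_analyze_code_changes (data : List (List (String × List String))) : Prop :=
  (data.all (fun it => it.any (fun p => p.1 == "codes"))) = true
instance (data : List (List (String × List String))) : Decidable (Pre_analyze_code_changes data) := by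
  unfold Pre_analyze_code_changes; infer_instance

def pvWitness_analyze_code_changes : (List (List (String × List String))) :=
  [[("codes", ["fc0102", "fc0103"])], [("codes", ["fc0102"])]]

def Spec_analyze_code_changes (data : List (List (String × List String)))
    (out : List (String × List (Int × List String))) : Prop := out = analyze_code_changes_alt data
instance (data : List (List (String × List String))) (out : List (String × List (Int × List String))) :
    Decidable (Spec_analyze_code_changes data out) := by unfold Spec_analyze_code_changes; infer_instance

-- ===== CLAIM (what is proved, stated in full; the proofs are below) =====
def Claim_equal_analyze_code_changes : Prop :=
  ∀ (data : List (List (String × List String))), Dom_analyze_code_changes data →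
    Pre_analyze_code_changes data →
    Spec_analyze_code_changes data (analyze_code_changes data)

-- ===== LEMMAS AND PROOFS =====

-- the element both ports keep for one iteration (none = filtered out)
def pvPick (ci : Int) (it : List (String × List String)) : Option String :=
  let codes := ((PySem.Dict.mk it).get? "codes").getD []
  if ci < (codes.length : Int) then some (PySem.List.pyGetD codes ci "") else none

def pvBytes (ci : Int) (data : List (List (String × List String))) : List (List String) :=
  (data.filterMap (pvPick ci)).map hex_to_bytes

def pvW (bs : List (List String)) : Int :=
  (PySem.List.max? (bs.map (fun arr => (arr.length : Int))) (fun x => x)).getD 0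

-- the '--'-padded value of row arr at position p (both ports' if-expression)
def pvPad (arr : List String) (p : Int) : String :=
  if p < (arr.length : Int) then PySem.List.pyGetD arr p "" else "--"

def pvVals (bs : List (List String)) (p : Int) : List String := bs.map (fun arr => pvPad arr p)

-- B's changed-position set for one code index
def pvChanged (ref : List String) (rest : List (List String)) : PySem.Set Int :=
  rest.foldl (fun changed arr =>
    (PySem.List.pyRange 0 (max (ref.length : Int) (arr.length : Int)) 1).foldl
      (fun changed pos =>
        if pvPad ref pos ≠ pvPad arr pos then PySem.Set.add changed pos else changed) changed)
    PySem.Set.empty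

lemma codeStrings_eq (ci : Int) (l : List (List (String × List String))) :
    ∀ (init : List String),
    l.foldl (fun code_strings iteration =>
      let codes := ((PySem.Dict.mk iteration).get? "codes").getD []
      if ci < (codes.length : Int) then code_strings ++ [PySem.List.pyGetD codes ci ""]
      else code_strings) init
    = init ++ l.filterMap (pvPick ci) := by
  induction l with
  | nil => simp
  | cons it l ih =>
    intro init
    rw [List.foldl_cons, List.filterMap_cons]
    by_cases h : ci < ((((PySem.Dict.mk it).get? "codes").getD []).length : Int)
    · rw [show pvPick ci it
          = some (PySem.List.pyGetD (((PySem.Dict.mk it).get? "codes").getD []) ci "") from by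
        simp [pvPick, h]]
      rw [ih]
      simp [h]
    · rw [show pvPick ci it = none from by simp [pvPick, h]]
      rw [ih]
      simp [h]

lemma bytesB_eq (ci : Int) (l : List (List (String × List String))) :
    l.filterMap (fun it =>
      let codes := ((PySem.Dict.mk it).get? "codes").getD []
      if ci < (codes.length : Int) then
        some (hex_to_bytes (PySem.List.pyGetD codes ci ""))
      else none)
    = pvBytes ci l := by
  unfold pvBytes
  rw [List.map_filterMap]
  apply List.filterMap_congr
  intro it _
  simp only [pvPick]
  by_cases h : ci < ((((PySem.Dict.mk it).get? "codes").getD []).length : Int)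
  · simp [h]
  · simp [h]

lemma le_pvW {bs : List (List String)} (hne : bs ≠ []) :
    ∀ a ∈ bs, (a.length : Int) ≤ pvW bs := by
  intro a ha
  unfold pvW
  cases hm : PySem.List.max? (bs.map (fun arr => (arr.length : Int))) (fun x => x) with
  | none => exact absurd (by simpa using (PySem.List.max?_eq_none_iff _ _).mp hm) hne
  | some m =>
    have := PySem.List.max?_isMax hm ((a.length : Int)) (List.mem_map.mpr ⟨a, ha, rfl⟩)
    simpa using this

lemma mem_inner_fold (ref arr : List String) :
    ∀ (l : List Int) (ch : PySem.Set Int) (p : Int),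
    p ∈ l.foldl (fun ch pos =>
        if pvPad ref pos ≠ pvPad arr pos then PySem.Set.add ch pos else ch) ch
      ↔ p ∈ ch ∨ (p ∈ l ∧ pvPad ref p ≠ pvPad arr p) := by
  intro l
  induction l with
  | nil => simp
  | cons x l ih =>
    intro ch p
    rw [List.foldl_cons]
    by_cases h : pvPad ref x ≠ pvPad arr x
    · rw [if_pos h, ih]
      simp only [PySem.Set.mem_add, List.mem_cons]
      constructor
      · rintro ((hp | rfl) | hp)
        · exact Or.inl hp
        · exact Or.inr ⟨Or.inl rfl, h⟩
        · exact Or.inr ⟨Or.inr hp.1, hp.2⟩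
      · rintro (hp | ⟨hp, hd⟩)
        · exact Or.inl (Or.inl hp)
        · rcases hp with rfl | hp
          · exact Or.inl (Or.inr rfl)
          · exact Or.inr ⟨hp, hd⟩
    · rw [if_neg h, ih]
      constructor
      · rintro (hp | hp)
        · exact Or.inl hp
        · exact Or.inr ⟨List.mem_cons_of_mem _ hp.1, hp.2⟩
      · rintro (hp | ⟨hp, hd⟩)
        · exact Or.inl hp
        · cases hp with
          | head => exact absurd hd h
          | tail _ hp => exact Or.inr ⟨hp, hd⟩

lemma nodup_inner_fold (ref arr : List String) :
    ∀ (l : List Int) (ch : PySem.Set Int), ch.Nodup →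
    (l.foldl (fun ch pos =>
        if pvPad ref pos ≠ pvPad arr pos then PySem.Set.add ch pos else ch) ch).Nodup := by
  intro l
  induction l with
  | nil => intro ch h; exact h
  | cons x l ih =>
    intro ch h
    rw [List.foldl_cons]
    by_cases hx : pvPad ref x ≠ pvPad arr x
    · rw [if_pos hx]; exact ih _ (PySem.Set.nodup_add _ _ h)
    · rw [if_neg hx]; exact ih _ h

lemma mem_pvChanged (ref : List String) (rest : List (List String)) (p : Int) :
    p ∈ pvChanged ref rest ↔
      ∃ arr ∈ rest, (0 ≤ p ∧ p < max (ref.length : Int) (arr.length : Int)) ∧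
        pvPad ref p ≠ pvPad arr p := by
  unfold pvChanged
  suffices h : ∀ (l : List (List String)) (ch : PySem.Set Int),
      p ∈ l.foldl (fun changed arr =>
        (PySem.List.pyRange 0 (max (ref.length : Int) (arr.length : Int)) 1).foldl
          (fun changed pos =>
            if pvPad ref pos ≠ pvPad arr pos then PySem.Set.add changed pos else changed) changed) ch
      ↔ p ∈ ch ∨ ∃ arr ∈ l, (0 ≤ p ∧ p < max (ref.length : Int) (arr.length : Int)) ∧
          pvPad ref p ≠ pvPad arr p by
    rw [h]
    simp [PySem.Set.empty]
  intro l
  induction l with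
  | nil => simp
  | cons arr l ih =>
    intro ch
    rw [List.foldl_cons, ih, mem_inner_fold, PySem.List.mem_pyRange_one]
    constructor
    · rintro ((hp | hp) | ⟨a, ha, hd⟩)
      · exact Or.inl hp
      · exact Or.inr ⟨arr, List.mem_cons_self, hp⟩
      · exact Or.inr ⟨a, List.mem_cons_of_mem _ ha, hd⟩
    · rintro (hp | ⟨a, ha, hd⟩)
      · exact Or.inl (Or.inl hp)
      · rcases List.mem_cons.mp ha with rfl | ha
        · exact Or.inl (Or.inr hd)
        · exact Or.inr ⟨a, ha, hd⟩

lemma nodup_pvChanged (ref : List String) (rest : List (List String)) :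
    (pvChanged ref rest).Nodup := by
  unfold pvChanged
  suffices h : ∀ (l : List (List String)) (ch : PySem.Set Int), ch.Nodup →
      (l.foldl (fun changed arr =>
        (PySem.List.pyRange 0 (max (ref.length : Int) (arr.length : Int)) 1).foldl
          (fun changed pos =>
            if pvPad ref pos ≠ pvPad arr pos then PySem.Set.add changed pos else changed) changed) ch).Nodup by
    exact h rest PySem.Set.empty List.nodup_nil
  intro l
  induction l with
  | nil => intro ch h; exact h
  | cons arr l ih =>
    intro ch h
    rw [List.foldl_cons]
    exact ih _ (nodup_inner_fold ref arr _ ch h)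

lemma one_lt_card_ofList (x : String) (l : List String) :
    1 < (PySem.Set.ofList (x :: l)).length ↔ ∃ y ∈ l, y ≠ x := by
  constructor
  · intro h
    by_contra hall
    push Not at hall
    have : PySem.Set.ofList (x :: l) = [x] := by
      rw [PySem.Set.ofList_cons]
      have hd : PySem.Set.discard (PySem.Set.ofList l) x = [] := by
        rw [List.eq_nil_iff_forall_not_mem]
        intro y hy
        rcases (PySem.Set.mem_discard _ _ _).mp hy with ⟨hy1, hy2⟩
        exact hy2 (hall y ((PySem.Set.mem_ofList _ _).mp hy1))
      rw [hd]
    rw [this] at h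
    simp at h
  · rintro ⟨y, hy, hyx⟩
    have hx : x ∈ PySem.Set.ofList (x :: l) := (PySem.Set.mem_ofList _ _).mpr (List.mem_cons_self)
    have hy' : y ∈ PySem.Set.ofList (x :: l) :=
      (PySem.Set.mem_ofList _ _).mpr (List.mem_cons_of_mem _ hy)
    cases hs : PySem.Set.ofList (x :: l) with
    | nil => rw [hs] at hx; simp at hx
    | cons a t =>
      rw [hs] at hx hy'
      cases t with
      | nil =>
        simp only [List.mem_singleton] at hx hy'
        exact absurd (hy'.trans hx.symm) hyx
      | cons b t => simp [List.length_cons]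

-- the changed-position predicate at p, stated via the padded column
lemma card_iff_exists (ref : List String) (rest : List (List String)) (p : Int) :
    1 < (PySem.Set.ofList (pvVals (ref :: rest) p)).length ↔
      ∃ arr ∈ rest, pvPad ref p ≠ pvPad arr p := by
  unfold pvVals
  rw [List.map_cons, one_lt_card_ofList]
  constructor
  · rintro ⟨y, hy, hyx⟩
    rcases List.mem_map.mp hy with ⟨arr, ha, rfl⟩
    exact ⟨arr, ha, fun h => hyx h.symm⟩
  · rintro ⟨arr, ha, hd⟩
    exact ⟨pvPad arr p, List.mem_map.mpr ⟨arr, ha, rfl⟩, fun h => hd h.symm⟩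

lemma sorted_changed_eq (ref : List String) (rest : List (List String)) :
    PySem.List.sorted (pvChanged ref rest) (fun x => x) false
      = (PySem.List.pyRange 0 (pvW (ref :: rest)) 1).filter
          (fun p => decide (1 < (PySem.Set.ofList (pvVals (ref :: rest) p)).length)) := by
  apply PySem.List.sorted_eq_of_perm_of_pairwise_lt
  · rw [List.perm_ext_iff_of_nodup
      ((PySem.List.nodup_pyRange_one 0 (pvW (ref :: rest))).filter _) (nodup_pvChanged ref rest)]
    intro p
    rw [List.mem_filter, PySem.List.mem_pyRange_one, mem_pvChanged, decide_eq_true_eq,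
        card_iff_exists]
    constructor
    · rintro ⟨⟨h0, hW⟩, arr, ha, hd⟩
      refine ⟨arr, ha, ⟨h0, ?_⟩, hd⟩
      by_contra hmax
      push Not at hmax
      have h1 : pvPad ref p = "--" := by unfold pvPad; rw [if_neg (by omega)]
      have h2 : pvPad arr p = "--" := by unfold pvPad; rw [if_neg (by omega)]
      exact hd (h1.trans h2.symm)
    · rintro ⟨arr, ha, ⟨h0, hmax⟩, hd⟩
      have hr : (ref.length : Int) ≤ pvW (ref :: rest) :=
        le_pvW (by simp) ref List.mem_cons_self
      have harr : (arr.length : Int) ≤ pvW (ref :: rest) :=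
        le_pvW (by simp) arr (List.mem_cons_of_mem _ ha)
      exact ⟨⟨h0, by omega⟩, arr, ha, hd⟩
  · exact (PySem.List.pairwise_lt_pyRange_one 0 (pvW (ref :: rest))).filter _

-- A's conditional-insert loop is the insert loop over the filtered positions
lemma foldl_insert_if_eq (v : Int → List String) :
    ∀ (ps : List Int) (d : PySem.Dict Int (List String)),
    ps.foldl (fun d p => if 1 < (PySem.Set.ofList (v p)).length then d.insert p (v p) else d) d
      = (ps.filter (fun p => decide (1 < (PySem.Set.ofList (v p)).length))).foldl
          (fun d p => d.insert p (v p)) d := by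
  intro ps
  induction ps with
  | nil => intro d; rfl
  | cons p ps ih =>
    intro d
    by_cases h : 1 < (PySem.Set.ofList (v p)).length
    · simp [h, ih]
    · simp [h, ih]

-- ===== VERDICT (by name: the statement is the Claim_ definition above) =====
theorem analyze_code_changes_spec : Claim_equal_analyze_code_changes := by
  intro data _ _
  show analyze_code_changes data = analyze_code_changes_alt data
  simp only [analyze_code_changes, analyze_code_changes_alt]
  refine congrArg _ (congrArg _ (PySem.List.foldl_congr_mem _ _ _ _ ?_))
  intro cc idx _
  simp only [codeStrings_eq idx data, List.nil_append, bytesB_eq idx data]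
  cases hcs : data.filterMap (pvPick idx) with
  | nil =>
    rw [if_pos rfl, show pvBytes idx data = [] from by simp [pvBytes, hcs]]
  | cons c cs =>
    rw [if_neg (by simp), if_neg (by simp),
        show pvBytes idx data = hex_to_bytes c :: cs.map hex_to_bytes from by simp [pvBytes, hcs]]
    simp only [PySem.List.foldl_append_singleton_eq_map, List.nil_append]
    show ((cc.insert ("CODE[" ++ PySem.Int.toStr idx ++ "]") PySem.Dict.empty).insert
        ("CODE[" ++ PySem.Int.toStr idx ++ "]")
        ((PySem.List.pyRange 0 (pvW (hex_to_bytes c :: cs.map hex_to_bytes)) 1).foldl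
          (fun d p =>
            if 1 < (PySem.Set.ofList (pvVals (hex_to_bytes c :: cs.map hex_to_bytes) p)).length
            then d.insert p (pvVals (hex_to_bytes c :: cs.map hex_to_bytes) p) else d)
          PySem.Dict.empty))
      = ((cc.insert ("CODE[" ++ PySem.Int.toStr idx ++ "]") PySem.Dict.empty).insert
        ("CODE[" ++ PySem.Int.toStr idx ++ "]")
        ((PySem.List.sorted (pvChanged (hex_to_bytes c) (cs.map hex_to_bytes)) (fun x => x) false).foldl
          (fun d pos => d.insert pos (pvVals (hex_to_bytes c :: cs.map hex_to_bytes) pos))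
          PySem.Dict.empty))
    rw [PySem.Dict.insert_insert_self, PySem.Dict.insert_insert_self]
    refine congrArg _ ?_
    rw [foldl_insert_if_eq (pvVals (hex_to_bytes c :: cs.map hex_to_bytes)),
        ← sorted_changed_eq (hex_to_bytes c) (cs.map hex_to_bytes)]
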